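-- pv_equiv track=rewrite | github.com/ssf2xguile/GarbageCollection | src/15_analyze_correctCount_and_appearCount.py | parse_string_into_apis
-- ===== SOURCE A (Python) =====
-- def parse_string_into_apis(str_):
--     apis = []
--     eles = str_.split('\t')[0].strip().split('.')
--
--     first_lib = eles[0]
--
--     for i in range(1, len(eles)-1):
--         try:
--             module_, library_ = eles[i].strip().rsplit(' ')
--             api = first_lib.strip() + '.' + module_.strip()
--             api = api.lower().replace(' ', '')
--             apis.append(api)
--             first_lib = library_
--         except ValueError:
--             try:
--                 module_, library_ = eles[i].strip().split(' ', 1)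
--                 api = first_lib.strip() + '.' + module_.strip()
--                 api = api.lower().replace(' ', '')
--                 apis.append(api)
--                 first_lib = library_
--             except ValueError:
--                 module_ = eles[i].strip()
--                 library_ = ''
--                 api = first_lib.strip() + '.' + module_.strip()
--                 api = api.lower().replace(' ', '')
--                 apis.append(api)
--                 first_lib = module_
--
--     api = first_lib.strip() + '.' + eles[-1].strip()
--     api = api.lower().replace(' ', '')
--     apis.append(api)
--     return apis[0]
-- ===== SOURCE B (Python) =====
-- def parse_string_into_apis(str_):
--     eles = str_.split('\t')[0].strip().split('.')
--     first = eles[0].strip()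
--     if len(eles) >= 3:
--         second = eles[1].strip().split(' ', 1)[0].strip()
--     elif len(eles) == 2:
--         second = eles[1].strip()
--     else:
--         second = first
--     return (first + '.' + second).lower().replace(' ', '')
-- ===== Notes on version B (the rewrite author's own statement) =====
-- stated objective: simpler
-- what changed: B drops A's loop, api list and try/except cascade entirely and computes the single returned first API directly by a three-way case split on the number of dot-separated elements, the cascade's first iteration reducing to taking the first space-delimited token of the second element.
import Mathlib
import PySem

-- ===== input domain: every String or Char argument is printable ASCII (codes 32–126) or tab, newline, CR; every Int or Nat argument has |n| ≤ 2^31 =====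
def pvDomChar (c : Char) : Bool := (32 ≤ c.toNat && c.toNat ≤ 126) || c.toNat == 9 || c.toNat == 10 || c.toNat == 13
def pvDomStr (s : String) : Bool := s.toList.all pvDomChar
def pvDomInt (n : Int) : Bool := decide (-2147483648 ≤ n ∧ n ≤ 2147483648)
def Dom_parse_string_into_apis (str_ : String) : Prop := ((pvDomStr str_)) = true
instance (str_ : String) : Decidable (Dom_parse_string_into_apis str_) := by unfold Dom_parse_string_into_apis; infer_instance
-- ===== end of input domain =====

-- B replaces A's loop-and-list with a direct three-case computation of the single returned
-- (first) API string; same return value on every input (objective: simpler).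

-- ===== PORT A =====
-- api = fl.strip() + '.' + m.strip(); api = api.lower().replace(' ', '')   (appears four times in A)
def pvMkApi (fl m : List Char) : List Char :=
  PySem.Chars.replace (PySem.Chars.lower (PySem.Chars.strip fl ++ '.' :: PySem.Chars.strip m)) [' '] []

-- the body of A's for-loop (the try/except cascade), over the state (apis, first_lib);
-- rsplit(' ') with no maxsplit produces the same list of parts as split(' '), so it is splitOn (exact)
def pvStepA (eles : List (List Char)) (st : List (List Char) × List Char) (i : Int) :
    List (List Char) × List Char :=
  let s := PySem.Chars.strip (PySem.List.pyGetD eles i [])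
  let parts := PySem.Chars.splitOn s [' ']
  if parts.length = 2 then
    -- try: module_, library_ = eles[i].strip().rsplit(' ')  (succeeds iff exactly 2 parts)
    let module_ := parts.headD []
    let library_ := (parts.drop 1).headD []
    (st.1 ++ [pvMkApi st.2 module_], library_)
  else
    let parts2 := PySem.Chars.splitOnMax s [' '] 1
    if parts2.length = 2 then
      -- except 1: module_, library_ = eles[i].strip().split(' ', 1)
      let module_ := parts2.headD []
      let library_ := (parts2.drop 1).headD []
      (st.1 ++ [pvMkApi st.2 module_], library_)
    else
      -- except 2: module_ = eles[i].strip(); library_ = ''  (first_lib becomes module_)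
      let module_ := s
      (st.1 ++ [pvMkApi st.2 module_], module_)

def parse_string_into_apis (str_ : String) : String :=
  let eles := PySem.Chars.splitOn
    (PySem.Chars.strip (PySem.List.pyGetD (PySem.Chars.splitOn str_.toList ['\t']) 0 [])) ['.']
  let first_lib := PySem.List.pyGetD eles 0 []
  let res := (PySem.List.pyRange 1 ((eles.length : Int) - 1) 1).foldl (pvStepA eles) ([], first_lib)
  let apis := res.1 ++ [pvMkApi res.2 (PySem.List.pyGetD eles (-1) [])]
  String.ofList (PySem.List.pyGetD apis 0 [])

-- ===== PORT B =====
def parse_string_into_apis_alt (str_ : String) : String :=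
  let eles := PySem.Chars.splitOn
    (PySem.Chars.strip (PySem.List.pyGetD (PySem.Chars.splitOn str_.toList ['\t']) 0 [])) ['.']
  let first := PySem.Chars.strip (PySem.List.pyGetD eles 0 [])
  let second :=
    if 3 ≤ eles.length then
      PySem.Chars.strip
        ((PySem.Chars.splitOnMax (PySem.Chars.strip (PySem.List.pyGetD eles 1 [])) [' '] 1).headD [])
    else if eles.length = 2 then
      PySem.Chars.strip (PySem.List.pyGetD eles 1 [])
    else first
  String.ofList (PySem.Chars.replace (PySem.Chars.lower (first ++ '.' :: second)) [' '] [])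

-- ===== PRECONDITION & SPEC =====
def Spec_parse_string_into_apis (str_ : String) (out : String) : Prop := out = parse_string_into_apis_alt str_
instance (str_ : String) (out : String) : Decidable (Spec_parse_string_into_apis str_ out) := by unfold Spec_parse_string_into_apis; infer_instance

-- ===== CLAIM (what is proved, stated in full; the proofs are below) =====
def Claim_equal_parse_string_into_apis : Prop := ∀ (str_ : String), Dom_parse_string_into_apis str_ → Spec_parse_string_into_apis str_ (parse_string_into_apis str_)

-- ===== LEMMAS AND PROOFS =====

-- splitOn by a single character: the first piece is the prefix before the first occurrence
theorem go_splitOn_first (c : Char) (fuel : Nat) :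
    ∀ (l cur : List Char) (acc : List (List Char)), l.length ≤ fuel →
    ∃ rest, PySem.Chars.splitOn.go [c] fuel l cur acc
      = acc.reverse ++ (cur.reverse ++ l.takeWhile (· != c)) :: rest := by
  induction fuel with
  | zero =>
    intro l cur acc h
    have : l = [] := List.eq_nil_of_length_eq_zero (Nat.le_zero.mp h)
    subst this
    exact ⟨[], by simp [PySem.Chars.splitOn.go]⟩
  | succ n ih =>
    intro l cur acc h
    cases l with
    | nil => exact ⟨[], by simp [PySem.Chars.splitOn.go]⟩
    | cons x xs =>
      by_cases hx : x = c
      · subst hx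
        obtain ⟨r, hr⟩ := ih xs [] (cur.reverse :: acc) (by simpa using Nat.le_of_succ_le_succ h)
        refine ⟨xs.takeWhile (· != x) :: r, ?_⟩
        simp [PySem.Chars.splitOn.go, List.isPrefixOf, hr]
      · obtain ⟨r, hr⟩ := ih xs (x :: cur) acc (by simpa using Nat.le_of_succ_le_succ h)
        exact ⟨r, by simp [PySem.Chars.splitOn.go, List.isPrefixOf, hx, Ne.symm hx, hr]⟩

theorem splitOn_first (c : Char) (s : List Char) :
    ∃ rest, PySem.Chars.splitOn s [c] = (s.takeWhile (· != c)) :: rest := by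
  obtain ⟨r, hr⟩ := go_splitOn_first c (s.length + 1) s [] [] (by omega)
  exact ⟨r, by simpa [PySem.Chars.splitOn] using hr⟩

-- the maxsplit = 0 tail behaviour of splitOnMax.go
theorem go_splitOnMax_zero (c : Char) (fuel : Nat) (l cur : List Char) (acc : List (List Char)) :
    PySem.Chars.splitOnMax.go [c] fuel 0 l cur acc = acc.reverse ++ [cur.reverse ++ l] := by
  cases fuel with
  | zero => simp [PySem.Chars.splitOnMax.go]
  | succ n => cases l <;> simp [PySem.Chars.splitOnMax.go]

theorem go_splitOnMax_one (c : Char) (fuel : Nat) :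
    ∀ (l cur : List Char) (acc : List (List Char)), l.length ≤ fuel →
    PySem.Chars.splitOnMax.go [c] fuel 1 l cur acc =
      if l.contains c then
        acc.reverse ++ [cur.reverse ++ l.takeWhile (· != c), (l.dropWhile (· != c)).tail]
      else acc.reverse ++ [cur.reverse ++ l] := by
  induction fuel with
  | zero =>
    intro l cur acc h
    have : l = [] := List.eq_nil_of_length_eq_zero (Nat.le_zero.mp h)
    subst this
    simp [PySem.Chars.splitOnMax.go]
  | succ n ih =>
    intro l cur acc h
    cases l with
    | nil => simp [PySem.Chars.splitOnMax.go]
    | cons x xs =>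
      by_cases hx : x = c
      · subst hx
        simp [PySem.Chars.splitOnMax.go, List.isPrefixOf, go_splitOnMax_zero]
      · rw [show PySem.Chars.splitOnMax.go [c] (n+1) 1 (x :: xs) cur acc
              = PySem.Chars.splitOnMax.go [c] n 1 xs (x :: cur) acc by
            simp [PySem.Chars.splitOnMax.go, List.isPrefixOf, Ne.symm hx],
          ih xs (x :: cur) acc (by simpa using Nat.le_of_succ_le_succ h)]
        simp [hx, Ne.symm hx]

-- s.split(' ', 1): two pieces around the first space, or [s] when there is none
theorem splitOnMax_one (c : Char) (s : List Char) :
    PySem.Chars.splitOnMax s [c] 1 =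
      if s.contains c then [s.takeWhile (· != c), (s.dropWhile (· != c)).tail]
      else [s] := by
  have := go_splitOnMax_one c (s.length + 1) s [] [] (by omega)
  simpa [PySem.Chars.splitOnMax] using this

-- whichever branch of A's try/except cascade fires, the module_ it appends is the
-- first piece of s.split(' ', 1)
theorem stepA_fst (eles : List (List Char)) (st : List (List Char) × List Char) (i : Int) :
    (pvStepA eles st i).1 =
      st.1 ++ [pvMkApi st.2
        ((PySem.Chars.splitOnMax (PySem.Chars.strip (PySem.List.pyGetD eles i [])) [' '] 1).headD [])] := by
  unfold pvStepA
  dsimp only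
  set s := PySem.Chars.strip (PySem.List.pyGetD eles i []) with hs
  obtain ⟨r, hr⟩ := splitOn_first ' ' s
  by_cases hc : ' ' ∈ s
  · have hsm : PySem.Chars.splitOnMax s [' '] 1
        = [s.takeWhile (· != ' '), (s.dropWhile (· != ' ')).tail] := by
      rw [splitOnMax_one]; simp [hc]
    split_ifs with h1 h2
    · simp [hr, hsm]
    · simp [hsm]
    · exact absurd (by rw [hsm]; rfl) h2
  · have ht : s.takeWhile (· != ' ') = s := by
      apply List.takeWhile_eq_self_iff.mpr
      intro x hx
      simp only [bne_iff_ne, ne_eq]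
      rintro rfl; exact hc hx
    have hsm : PySem.Chars.splitOnMax s [' '] 1 = [s] := by
      rw [splitOnMax_one]; simp [hc]
    split_ifs with h1 h2
    · simp [hr, hsm, ht]
    · rw [hsm] at h2
    · simp [hsm]

-- A's loop only appends to apis, so the api appended first stays apis[0]
theorem foldl_stepA_prefix (eles : List (List Char)) :
    ∀ (l : List Int) (st : List (List Char) × List Char),
      st.1 <+: (l.foldl (pvStepA eles) st).1 := by
  intro l
  induction l with
  | nil => intro st; exact List.prefix_refl _
  | cons i t ih =>
    intro st
    refine List.IsPrefix.trans ?_ (ih (pvStepA eles st i))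
    rw [stepA_fst]
    exact ⟨_, rfl⟩

-- ===== VERDICT (by name: the statement is the Claim_ definition above) =====
theorem parse_string_into_apis_spec : Claim_equal_parse_string_into_apis := by
  intro str_ _
  unfold Spec_parse_string_into_apis parse_string_into_apis parse_string_into_apis_alt
  obtain ⟨es, hes⟩ := splitOn_first '.'
    (PySem.Chars.strip (PySem.List.pyGetD (PySem.Chars.splitOn str_.toList ['\t']) 0 []))
  rw [hes]
  dsimp only
  generalize (PySem.Chars.strip
      (PySem.List.pyGetD (PySem.Chars.splitOn str_.toList ['\t']) 0 [])).takeWhile (· != '.') = e0 at *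
  match es with
  | [] =>
    rw [PySem.List.pyRange_one_eq_nil (by norm_num)]
    simp [pvMkApi, PySem.List.pyGetD, PySem.List.pyGet?, PySem.List.pyIdx?]
  | [e1] =>
    rw [PySem.List.pyRange_one_eq_nil (by norm_num)]
    simp [pvMkApi, PySem.List.pyGetD, PySem.List.pyGet?, PySem.List.pyIdx?]
  | e1 :: e2 :: es' =>
    -- len(eles) >= 3 : the answer is the api appended on the loop's first iteration (i = 1)
    have hlen : ((1:Int) < ((e0 :: e1 :: e2 :: es').length : Int) - 1) := by
      simp only [List.length_cons]; push_cast; omega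
    rw [PySem.List.pyRange_one_cons hlen]
    simp only [List.foldl_cons]
    obtain ⟨t, ht⟩ := foldl_stepA_prefix (e0 :: e1 :: e2 :: es')
      (PySem.List.pyRange (1 + 1) (((e0 :: e1 :: e2 :: es').length : Int) - 1) 1)
      (pvStepA (e0 :: e1 :: e2 :: es') ([], PySem.List.pyGetD (e0 :: e1 :: e2 :: es') 0 []) 1)
    rw [stepA_fst] at ht
    rw [← ht]
    have h3 : 3 ≤ (e0 :: e1 :: e2 :: es').length := by simp
    rw [if_pos h3]
    simp [pvMkApi, PySem.List.pyGetD]
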